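-- pv_equiv track=rewrite | github.com/filipe-costa/dsa-exercises | exams/2020_mock.py | LargestElementAboveAndBelowAntiDiagonal
-- ===== SOURCE A (Python) =====
-- def LargestElementAboveAndBelowAntiDiagonal(A):
--   max_above = A[0][len(A[0]) - 2]
--   max_below = A[1][len(A[0]) - 1]
--
--   for i in range(0, len(A) - 1):
--     for j in range(0, len(A[i]) - i - 1):
--       if A[i][j] > max_above:
--         max_above = A[i][j]
--
--   for i in range(len(A) - 1, 0, -1):
--     for j in range(len(A[i]) - 1, 0, -1):
--       if A[i][j] > max_below:
--         max_below = A[i][j]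
--
--   return (max_above, max_below)
-- ===== SOURCE B (Python) =====
-- def LargestElementAboveAndBelowAntiDiagonal(A):
--   above = [A[0][len(A[0]) - 2]]
--   below = [A[1][len(A[0]) - 1]]
--   for i, row in enumerate(A):
--     if i < len(A) - 1:
--       above.extend(row[:max(0, len(row) - i - 1)])
--     if i > 0:
--       below.extend(row[1:])
--   above.sort()
--   below.sort()
--   return (above[-1], below[-1])
-- ===== Notes on version B (the rewrite author's own statement) =====
-- stated objective: alternative
-- what changed: B collects each region's elements once, in a single enumerate pass using row slices (row[:len(row)-i-1] clamped, row[1:]), then sorts each collection and returns its last element, instead of A's two separate index double-loops that maintain running maxima (the second scanning both dimensions backwards).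
import Mathlib
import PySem

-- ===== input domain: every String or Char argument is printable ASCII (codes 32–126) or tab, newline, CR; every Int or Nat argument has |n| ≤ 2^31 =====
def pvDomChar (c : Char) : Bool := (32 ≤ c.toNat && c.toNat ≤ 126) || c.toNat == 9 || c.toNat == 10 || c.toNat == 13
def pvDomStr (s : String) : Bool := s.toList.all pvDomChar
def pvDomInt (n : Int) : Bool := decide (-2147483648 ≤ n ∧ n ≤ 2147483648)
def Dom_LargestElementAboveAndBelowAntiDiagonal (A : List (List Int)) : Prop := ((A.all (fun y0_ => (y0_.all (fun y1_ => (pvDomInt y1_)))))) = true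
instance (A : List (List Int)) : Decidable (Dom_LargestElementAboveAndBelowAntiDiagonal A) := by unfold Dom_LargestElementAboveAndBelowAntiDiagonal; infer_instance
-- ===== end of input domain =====

-- B collects each region's elements in one enumerate pass using row slices, sorts each
-- collection and returns its last element, instead of A's two accumulator double-loops:
-- an alternative (collect-sort-take-last) algorithm, not claimed faster.

-- ===== PORT A =====
def LargestElementAboveAndBelowAntiDiagonal (A : List (List Int)) : Int × Int :=
  let row0 := PySem.List.pyGetD A 0 []
  let maxAbove0 := PySem.List.pyGetD row0 ((row0.length : Int) - 2) 0
  let maxBelow0 := PySem.List.pyGetD (PySem.List.pyGetD A 1 []) ((row0.length : Int) - 1) 0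
  let maxAbove := (PySem.List.pyRange 0 ((A.length : Int) - 1) 1).foldl (fun m i =>
      let row := PySem.List.pyGetD A i []
      (PySem.List.pyRange 0 ((row.length : Int) - i - 1) 1).foldl (fun m j =>
        let x := PySem.List.pyGetD row j 0
        if x > m then x else m) m) maxAbove0
  let maxBelow := (PySem.List.pyRange ((A.length : Int) - 1) 0 (-1)).foldl (fun m i =>
      let row := PySem.List.pyGetD A i []
      (PySem.List.pyRange ((row.length : Int) - 1) 0 (-1)).foldl (fun m j =>
        let x := PySem.List.pyGetD row j 0
        if x > m then x else m) m) maxBelow0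
  (maxAbove, maxBelow)

-- ===== PORT B =====
def LargestElementAboveAndBelowAntiDiagonal_alt (A : List (List Int)) : Int × Int :=
  let row0 := PySem.List.pyGetD A 0 []
  let above0 := [PySem.List.pyGetD row0 ((row0.length : Int) - 2) 0]
  let below0 := [PySem.List.pyGetD (PySem.List.pyGetD A 1 []) ((row0.length : Int) - 1) 0]
  let p := (PySem.List.enumerate A).foldl (fun p ir =>
      ((if ir.1 < (A.length : Int) - 1 then
          p.1 ++ PySem.List.slice ir.2 none (some (max 0 ((ir.2.length : Int) - ir.1 - 1)))
        else p.1),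
       (if 0 < ir.1 then p.2 ++ PySem.List.slice ir.2 (some 1) none else p.2)))
    (above0, below0)
  (PySem.List.pyGetD (PySem.List.sorted p.1 (fun x => x)) (-1) 0,
   PySem.List.pyGetD (PySem.List.sorted p.2 (fun x => x)) (-1) 0)

-- ===== PRECONDITION & SPEC =====
-- Exactly the inputs on which the Python A returns (otherwise its seed accesses A[0], A[1],
-- A[0][len(A[0])-2] or A[1][len(A[0])-1] raise an IndexError; B raises on the same inputs).
def Pre_LargestElementAboveAndBelowAntiDiagonal (A : List (List Int)) : Prop :=
  2 ≤ A.length ∧ 1 ≤ (A.getD 0 []).length ∧ (A.getD 0 []).length ≤ (A.getD 1 []).length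
instance (A : List (List Int)) : Decidable (Pre_LargestElementAboveAndBelowAntiDiagonal A) := by
  unfold Pre_LargestElementAboveAndBelowAntiDiagonal; infer_instance
def pvWitness_LargestElementAboveAndBelowAntiDiagonal : List (List Int) := [[1, 2], [3, 4]]

def Spec_LargestElementAboveAndBelowAntiDiagonal (A : List (List Int)) (out : Int × Int) : Prop := out = LargestElementAboveAndBelowAntiDiagonal_alt A
instance (A : List (List Int)) (out : Int × Int) : Decidable (Spec_LargestElementAboveAndBelowAntiDiagonal A out) := by unfold Spec_LargestElementAboveAndBelowAntiDiagonal; infer_instance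

-- ===== CLAIM (what is proved, stated in full; the proofs are below) =====
def Claim_equal_LargestElementAboveAndBelowAntiDiagonal : Prop := ∀ (A : List (List Int)), Dom_LargestElementAboveAndBelowAntiDiagonal A → Pre_LargestElementAboveAndBelowAntiDiagonal A → Spec_LargestElementAboveAndBelowAntiDiagonal A (LargestElementAboveAndBelowAntiDiagonal A)

-- ===== LEMMAS AND PROOFS =====

-- A's update step is exactly Int.max.
theorem pvIteMax (m x : Int) : (if x > m then x else m) = max m x := by
  rw [max_def]; split_ifs <;> omega

-- a running max ignores where the extra element is folded in
theorem pvFoldlMaxComm (l : List Int) (a x : Int) :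
    l.foldl max (max a x) = max (l.foldl max a) x := by
  induction l generalizing a with
  | nil => rfl
  | cons y t ih => simpa [List.foldl_cons, max_right_comm a x y] using ih (max a y)

-- a running max is invariant under reversing the list
theorem pvFoldlMaxReverse (l : List Int) (a : Int) :
    l.reverse.foldl max a = l.foldl max a := by
  induction l generalizing a with
  | nil => rfl
  | cons x t ih => simp [List.foldl_append, ih, ← pvFoldlMaxComm]

-- nested running max = running max over the concatenation
theorem pvFoldlFoldlMax {α : Type} (l : List α) (g : α → List Int) (a : Int) :
    l.foldl (fun m i => (g i).foldl max m) a = (l.flatMap g).foldl max a := by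
  induction l generalizing a with
  | nil => rfl
  | cons x t ih => simp [List.foldl_append, ih]

-- A's inner if-loop over a range is a running max over the mapped list
theorem pvInnerMax (r : List Int) (f : Int → Int) (m : Int) :
    r.foldl (fun m j => if f j > m then f j else m) m = (r.map f).foldl max m := by
  rw [List.foldl_map]
  simp only [pvIteMax]

theorem pvReverseFlatMap {α : Type} (l : List α) (g : α → List Int) :
    (l.flatMap g).reverse = l.reverse.flatMap (fun i => (g i).reverse) := by
  induction l with
  | nil => rfl
  | cons x t ih => simp [List.flatMap_cons, ih]

-- the backwards double traversal of a region is the forward running max over its concatenation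
theorem pvBelowFold {α : Type} (l : List α) (R : α → List Int) (a : Int) :
    l.reverse.foldl (fun m i => (R i).reverse.foldl max m) a = (l.flatMap R).foldl max a := by
  rw [pvFoldlFoldlMax, ← pvReverseFlatMap, pvFoldlMaxReverse]

-- B's single loop updating both region lists splits into two independent folds
theorem pvPairFoldl {α β γ : Type} (l : List α) (f : β → α → β) (g : γ → α → γ) (a : β) (b : γ) :
    l.foldl (fun p x => (f p.1 x, g p.2 x)) (a, b) = (l.foldl f a, l.foldl g b) := by
  induction l generalizing a b with
  | nil => rfl
  | cons x t ih => simpa using ih (f a x) (g b x)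

-- a guarded extend-loop is the seed followed by the guarded concatenation
theorem pvFoldlIfAppend {α : Type} (l : List α) (c : α → Prop) [DecidablePred c]
    (h : α → List Int) (init : List Int) :
    l.foldl (fun acc x => if c x then acc ++ h x else acc) init
      = init ++ l.flatMap (fun x => if c x then h x else []) := by
  have : (fun (acc : List Int) x => if c x then acc ++ h x else acc)
      = fun acc x => acc ++ (if c x then h x else []) := by
    funext acc x; split_ifs <;> simp
  rw [this, PySem.List.foldl_append_eq_flatMap]

-- B's single guarded extend-loop over a pair is the two seeds followed by the guarded concatenations
theorem pvPairFoldl2 {α : Type} (l : List α) (c1 c2 : α → Prop) [DecidablePred c1] [DecidablePred c2]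
    (h1 h2 : α → List Int) (a b : List Int) :
    l.foldl (fun p x => ((if c1 x then p.1 ++ h1 x else p.1), (if c2 x then p.2 ++ h2 x else p.2))) (a, b)
      = (a ++ l.flatMap (fun x => if c1 x then h1 x else []),
         b ++ l.flatMap (fun x => if c2 x then h2 x else [])) := by
  have h := pvPairFoldl l (fun u x => if c1 x then u ++ h1 x else u)
      (fun u x => if c2 x then u ++ h2 x else u) a b
  simp only [] at h
  rw [h, pvFoldlIfAppend, pvFoldlIfAppend]

-- 'for j in range(k): row[j]' enumerates the prefix row[:k]
theorem pvRangeMapTakeNat (row : List Int) (k : Nat) (h : k ≤ row.length) :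
    (PySem.List.pyRange 0 (k : Int) 1).map (fun j => PySem.List.pyGetD row j 0)
      = row.take k := by
  induction k with
  | zero => simp [PySem.List.pyRange_one_eq_nil]
  | succ n ih =>
    rw [show ((n + 1 : Nat) : Int) = (n : Int) + 1 by push_cast; ring,
       PySem.List.pyRange_one_succ_right (by positivity), List.map_append, ih (by omega)]
    have hn : n < row.length := by omega
    rw [List.take_add_one, List.getElem?_eq_getElem hn]
    simp [PySem.List.pyGetD_natCast, List.getD_eq_getElem?_getD, List.getElem?_eq_getElem hn]

theorem pvRangeMapTake (row : List Int) (m : Int) (h : m ≤ (row.length : Int)) :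
    (PySem.List.pyRange 0 m 1).map (fun j => PySem.List.pyGetD row j 0)
      = row.take m.toNat := by
  by_cases hm : m ≤ 0
  · rw [PySem.List.pyRange_one_eq_nil hm]
    rw [show m.toNat = 0 by omega]
    simp
  · have : m = (m.toNat : Int) := by omega
    rw [this]
    exact pvRangeMapTakeNat row m.toNat (by omega)

-- a running max lands on a member of seed :: elements
theorem pvFoldlMaxMem (l : List Int) (a : Int) : l.foldl max a ∈ a :: l := by
  induction l generalizing a with
  | nil => simp
  | cons x t ih =>
    simp only [List.foldl_cons]
    rcases List.mem_cons.mp (ih (max a x)) with h | h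
    · rw [h]
      rcases max_choice a x with hc | hc <;> rw [hc] <;> simp
    · exact List.mem_cons.mpr (Or.inr (List.mem_cons.mpr (Or.inr h)))

-- in a ≤-pairwise list the last element bounds every member
theorem pvPairwiseLeGetLast (xs : List Int) (hp : xs.Pairwise (· ≤ ·)) :
    ∀ y ∈ xs, ∀ m, xs.getLast? = some m → y ≤ m := by
  induction xs with
  | nil => intro y hy; cases hy
  | cons x t ih =>
    intro y hy m hm
    cases t with
    | nil =>
      simp at hy hm
      omega
    | cons z t' =>
      rw [List.getLast?_cons_cons] at hm
      have hp' := List.pairwise_cons.mp hp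
      rcases List.mem_cons.mp hy with rfl | hy'
      · exact le_trans (hp'.1 z (by simp))
          (ih hp'.2 z (by simp) m hm)
      · exact ih hp'.2 y hy' m hm

-- last element of sorted(seed :: elements) is the running max over the elements
theorem pvSortedLast (a : Int) (l : List Int) :
    PySem.List.pyGetD (PySem.List.sorted (a :: l) (fun x => x)) (-1) 0
      = l.foldl max a := by
  have hne : PySem.List.sorted (a :: l) (fun x => x) ≠ [] := by
    rw [Ne, PySem.List.sorted_eq_nil_iff]; simp
  rw [PySem.List.pyGetD_neg_one _ _ hne]
  have hmem : (PySem.List.sorted (a :: l) (fun x => x)).getLast hne ∈ a :: l :=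
    (PySem.List.mem_sorted _ _ _ _).mp (List.getLast_mem hne)
  have hpw : (PySem.List.sorted (a :: l) (fun x => x)).Pairwise (· ≤ ·) := by
    simpa using PySem.List.sorted_pairwise (a :: l) (fun x => x)
  have hub : ∀ y ∈ a :: l, y ≤ (PySem.List.sorted (a :: l) (fun x => x)).getLast hne := by
    intro y hy
    exact pvPairwiseLeGetLast _ hpw y ((PySem.List.mem_sorted _ _ _ _).mpr hy) _
      (List.getLast?_eq_some_getLast hne)
  have h1 := PySem.List.le_foldl_max l a
  have h2 := pvFoldlMaxMem l a
  refine le_antisymm ?_ (hub _ h2)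
  rcases List.mem_cons.mp hmem with h | h
  · rw [h]; exact h1.1
  · exact h1.2 _ h

-- ===== VERDICT (by name: the statement is the Claim_ definition above) =====
theorem LargestElementAboveAndBelowAntiDiagonal_spec : Claim_equal_LargestElementAboveAndBelowAntiDiagonal := by
  intro A _ hPre
  obtain ⟨hn, hr0, hr01⟩ := hPre
  show _ = _
  unfold LargestElementAboveAndBelowAntiDiagonal LargestElementAboveAndBelowAntiDiagonal_alt
  simp only []
  rw [PySem.List.enumerate_eq_map_pyRange A [], List.foldl_map]
  simp only [PySem.List.len_eq]
  rw [pvPairFoldl2]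
  apply Prod.ext
  · -- above component
    simp only [pvInnerMax]
    rw [pvFoldlFoldlMax]
    simp only [List.singleton_append]
    rw [pvSortedLast]
    congr 1
    rw [PySem.List.pyRange_one_append 0 ((A.length : Int) - 1) (A.length : Int) (by omega) (by omega),
        List.flatMap_append]
    have hlast : PySem.List.pyRange ((A.length : Int) - 1) (A.length : Int) 1 = [(A.length : Int) - 1] := by
      have h := PySem.List.pyRange_one_singleton ((A.length : Int) - 1)
      rw [sub_add_cancel] at h
      exact h
    rw [hlast]
    simp only [List.flatMap_cons, List.flatMap_nil, List.append_nil]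
    rw [if_neg (lt_irrefl ((A.length : Int) - 1)), List.append_nil]
    apply List.flatMap_congr
    intro i hi
    obtain ⟨hi0, hi1⟩ := PySem.List.mem_pyRange_one.mp hi
    rw [if_pos hi1, PySem.List.slice_to _ (le_max_left 0 _),
        pvRangeMapTake _ _ (by omega : ((PySem.List.pyGetD A i []).length : Int) - i - 1 ≤ ((PySem.List.pyGetD A i []).length : Int))]
    have hm : (max 0 (((PySem.List.pyGetD A i []).length : Int) - i - 1)).toNat = (((PySem.List.pyGetD A i []).length : Int) - i - 1).toNat := by
      by_cases h0 : (0 : Int) ≤ ((PySem.List.pyGetD A i []).length : Int) - i - 1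
      · rw [max_eq_right h0]
      · rw [max_eq_left (by omega : ((PySem.List.pyGetD A i []).length : Int) - i - 1 ≤ (0 : Int))]
        omega
    rw [hm]
  · -- below component
    simp only [pvInnerMax]
    have e1 : PySem.List.pyRange ((A.length : Int) - 1) 0 (-1)
        = (PySem.List.pyRange 1 (A.length : Int) 1).reverse := by
      simpa using PySem.List.pyRange_neg_one_eq_reverse ((A.length : Int) - 1) 0
    rw [e1]
    have hfun : (fun (m i : Int) =>
        ((PySem.List.pyRange (((PySem.List.pyGetD A i []).length : Int) - 1) 0 (-1)).map
          (fun j => PySem.List.pyGetD (PySem.List.pyGetD A i []) j 0)).foldl max m)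
      = fun (m i : Int) =>
        (((PySem.List.pyRange 1 (((PySem.List.pyGetD A i []).length : Int)) 1).map
          (fun j => PySem.List.pyGetD (PySem.List.pyGetD A i []) j 0)).reverse).foldl max m := by
      funext m i
      rw [show PySem.List.pyRange (((PySem.List.pyGetD A i []).length : Int) - 1) 0 (-1)
          = (PySem.List.pyRange 1 (((PySem.List.pyGetD A i []).length : Int)) 1).reverse from by
        simpa using PySem.List.pyRange_neg_one_eq_reverse (((PySem.List.pyGetD A i []).length : Int) - 1) 0,
        List.map_reverse]
    rw [hfun, pvBelowFold]
    simp only [List.singleton_append]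
    rw [pvSortedLast]
    congr 1
    rw [PySem.List.pyRange_one_append 0 1 (A.length : Int) (by omega) (by omega), List.flatMap_append]
    have h01 : PySem.List.pyRange (0 : Int) 1 1 = [0] := by decide
    rw [h01]
    simp only [List.flatMap_cons, List.flatMap_nil, List.append_nil]
    rw [if_neg (lt_irrefl (0 : Int)), List.nil_append]
    apply List.flatMap_congr
    intro i hi
    obtain ⟨hi0, hi1⟩ := PySem.List.mem_pyRange_one.mp hi
    rw [if_pos (by omega : (0 : Int) < i), PySem.List.slice_from_one,
        PySem.List.map_pyGetD_pyRange' (PySem.List.pyGetD A i []) 0 (by omega : (0 : Int) ≤ 1)]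
    simp [List.drop_one]
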